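-- pv_equiv track=rewrite | github.com/qazwsxedc121/lex_mint | src/llm_runtime/context.py | filter_messages_by_context_boundary
-- ===== SOURCE A (Python) =====
-- from typing import Any
--
-- def filter_messages_by_context_boundary(
--     messages: list[dict[str, Any]],
-- ) -> tuple[list[dict[str, Any]], str | None]:
--     """Keep only messages after the last summary/separator boundary."""
--     last_boundary_index = -1
--     boundary_is_summary = False
--
--     for index in range(len(messages) - 1, -1, -1):
--         role = messages[index].get("role")
--         if role in {"separator", "summary"}:
--             last_boundary_index = index
--             boundary_is_summary = role == "summary"
--             break
--
--     if last_boundary_index == -1: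
--         return messages, None
--
--     summary_content = None
--     if boundary_is_summary:
--         summary_content = messages[last_boundary_index].get("content", "")
--
--     return messages[last_boundary_index + 1 :], summary_content
-- ===== SOURCE B (Python) =====
-- from typing import Any
--
-- def filter_messages_by_context_boundary(
--     messages: list[dict[str, Any]],
-- ) -> tuple[list[dict[str, Any]], str | None]:
--     """Keep only messages after the last summary/separator boundary.
--
--     Index-free decomposition: walk the reversed list, collecting the kept
--     messages themselves until the first boundary element is met, then read
--     the summary off that element directly; no index bookkeeping or slicing.
--     """
--     kept = []
--     boundary = None
--     for msg in reversed(messages):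
--         if msg.get("role") in ("separator", "summary"):
--             boundary = msg
--             break
--         kept.append(msg)
--     if boundary is None:
--         return messages, None
--     kept.reverse()
--     summary = boundary.get("content", "") if boundary.get("role") == "summary" else None
--     return kept, summary
-- ===== Notes on version B (the rewrite author's own statement) =====
-- stated objective: alternative
-- what changed: Instead of finding a boundary index and slicing, B walks the reversed list collecting the kept message dicts themselves until it hits the first boundary element, then reads the summary off that element directly - no indices or slicing at all.
import Mathlib
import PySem

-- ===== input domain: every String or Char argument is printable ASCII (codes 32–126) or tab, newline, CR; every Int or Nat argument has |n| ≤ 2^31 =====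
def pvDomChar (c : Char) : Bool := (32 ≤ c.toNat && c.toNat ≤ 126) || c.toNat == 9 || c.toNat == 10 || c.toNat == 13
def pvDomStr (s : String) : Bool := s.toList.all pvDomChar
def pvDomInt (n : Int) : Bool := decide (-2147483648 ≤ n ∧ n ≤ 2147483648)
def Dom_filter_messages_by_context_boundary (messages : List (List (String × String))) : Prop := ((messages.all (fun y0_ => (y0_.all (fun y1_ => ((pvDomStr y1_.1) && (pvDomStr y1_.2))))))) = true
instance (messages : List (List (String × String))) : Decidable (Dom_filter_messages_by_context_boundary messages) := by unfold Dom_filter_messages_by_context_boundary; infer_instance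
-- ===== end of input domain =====

-- B replaces A's index-based backward scan and slice by an index-free walk of the
-- reversed list that collects the kept message dicts themselves (alternative
-- decomposition, same cost).

-- ===== PORT A =====
-- A's backward loop `for index in range(len(messages)-1, -1, -1)` with break:
-- structural recursion on the number of indices left to inspect (k = index + 1).
def fmcbA_loop (messages : List (List (String × String))) : Nat → Int × Bool
  | 0 => (-1, false)
  | k + 1 =>
    let role := PySem.Dict.get? (PySem.Dict.mk (messages.getD k [])) "role"
    if role == some "separator" || role == some "summary" then
      ((k : Int), role == some "summary")
    else
      fmcbA_loop messages k

def filter_messages_by_context_boundary (messages : List (List (String × String))) : (List (List (String × String))) × Option String :=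
  let r := fmcbA_loop messages messages.length
  let last_boundary_index := r.1
  let boundary_is_summary := r.2
  if last_boundary_index == -1 then (messages, none)
  else
    let summary_content : Option String :=
      if boundary_is_summary then
        some (PySem.Dict.getD (PySem.Dict.mk (PySem.List.pyGetD messages last_boundary_index [])) "content" "")
      else none
    (PySem.List.slice messages (some (last_boundary_index + 1)) none, summary_content)

-- ===== PORT B =====
-- B's loop `for msg in reversed(messages)`: recursion over the reversed list,
-- accumulating the kept messages (kept.append) until the first boundary element.
def fmcbB_go (kept : List (List (String × String))) : List (List (String × String)) → (List (List (String × String))) × Option (List (String × String))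
  | [] => (kept, none)
  | msg :: rest =>
    let role := PySem.Dict.get? (PySem.Dict.mk msg) "role"
    if role == some "separator" || role == some "summary" then
      (kept, some msg)
    else
      fmcbB_go (kept ++ [msg]) rest

def filter_messages_by_context_boundary_alt (messages : List (List (String × String))) : (List (List (String × String))) × Option String :=
  match fmcbB_go [] messages.reverse with
  | (_, none) => (messages, none)
  | (kept, some boundary) =>
    let summary : Option String :=
      if PySem.Dict.get? (PySem.Dict.mk boundary) "role" == some "summary" then
        some (PySem.Dict.getD (PySem.Dict.mk boundary) "content" "")
      else none
    (kept.reverse, summary)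

-- ===== PRECONDITION & SPEC =====
def Spec_filter_messages_by_context_boundary (messages : List (List (String × String))) (out : (List (List (String × String))) × Option String) : Prop := out = filter_messages_by_context_boundary_alt messages
instance (messages : List (List (String × String))) (out : (List (List (String × String))) × Option String) : Decidable (Spec_filter_messages_by_context_boundary messages out) := by unfold Spec_filter_messages_by_context_boundary; infer_instance

-- ===== CLAIM (what is proved, stated in full; the proofs are below) =====
def Claim_equal_filter_messages_by_context_boundary : Prop := ∀ (messages : List (List (String × String))), Dom_filter_messages_by_context_boundary messages → Spec_filter_messages_by_context_boundary messages (filter_messages_by_context_boundary messages)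

-- ===== LEMMAS AND PROOFS =====

-- Joint characterization of A's index loop over the first k indices and B's
-- element walk over the reversed k-prefix (both inspect msgs[k-1], msgs[k-2], …).
theorem fmcb_rel (msgs : List (List (String × String))) :
    ∀ k, k ≤ msgs.length → ∀ kept,
      (fmcbA_loop msgs k = (-1, false) ∧
        fmcbB_go kept ((msgs.take k).reverse) = (kept ++ (msgs.take k).reverse, none))
      ∨ (∃ j : Nat, j < k ∧
          fmcbA_loop msgs k =
            ((j : Int), PySem.Dict.get? (PySem.Dict.mk (msgs[j]?.getD [])) "role" == some "summary") ∧
          fmcbB_go kept ((msgs.take k).reverse) =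
            (kept ++ ((msgs.take k).drop (j+1)).reverse, some (msgs[j]?.getD []))) := by
  intro k
  induction k with
  | zero => intro _ kept; left; exact ⟨rfl, by simp [fmcbB_go]⟩
  | succ k ih =>
    intro hk kept
    have hk' : k < msgs.length := by omega
    have htake : msgs.take (k+1) = msgs.take k ++ [msgs[k]?.getD []] := by
      rw [List.take_add_one]
      simp [List.getElem?_eq_getElem hk']
    by_cases hb : (PySem.Dict.get? (PySem.Dict.mk (msgs[k]?.getD [])) "role" == some "separator" ||
        PySem.Dict.get? (PySem.Dict.mk (msgs[k]?.getD [])) "role" == some "summary") = true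
    · right
      refine ⟨k, by omega, ?_, ?_⟩
      · simp only [Bool.or_eq_true, beq_iff_eq] at hb
        rcases hb with h | h <;> simp [fmcbA_loop, h, List.getD]
      · have hdrop : List.drop (k+1) (msgs.take k ++ [msgs[k]?.getD []]) = [] := by
          apply List.drop_eq_nil_of_le
          simp [List.length_take]; try omega
        simp only [Bool.or_eq_true, beq_iff_eq] at hb
        rcases hb with h | h <;> simp [htake, fmcbB_go, h, hdrop]
    · simp only [Bool.or_eq_true, beq_iff_eq, not_or] at hb
      have hA : fmcbA_loop msgs (k+1) = fmcbA_loop msgs k := by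
        simp [fmcbA_loop, hb.1, hb.2, List.getD]
      have hB : fmcbB_go kept ((msgs.take (k+1)).reverse) =
          fmcbB_go (kept ++ [msgs[k]?.getD []]) ((msgs.take k).reverse) := by
        simp [htake, fmcbB_go, hb.1, hb.2]
      rcases ih (by omega) (kept ++ [msgs[k]?.getD []]) with ⟨h1, h2⟩ | ⟨j, hj, h1, h2⟩
      · left
        refine ⟨hA ▸ h1, ?_⟩
        rw [hB, h2, htake]
        simp
      · right
        refine ⟨j, by omega, hA ▸ h1, ?_⟩
        rw [hB, h2, htake]
        have hdrop : List.drop (j+1) (msgs.take k ++ [msgs[k]?.getD []]) =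
            List.drop (j+1) (msgs.take k) ++ [msgs[k]?.getD []] := by
          rw [List.drop_append_of_le_length]
          simp [List.length_take]; try omega
        rw [hdrop]
        simp

-- ===== VERDICT (by name: the statement is the Claim_ definition above) =====
theorem filter_messages_by_context_boundary_spec : Claim_equal_filter_messages_by_context_boundary := by
  intro messages _
  unfold Spec_filter_messages_by_context_boundary
  unfold filter_messages_by_context_boundary filter_messages_by_context_boundary_alt
  rcases fmcb_rel messages messages.length (le_refl _) [] with ⟨h1, h2⟩ | ⟨j, hj, h1, h2⟩
  · rw [List.take_length] at h2
    simp [h1, h2]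
  · rw [List.take_length] at h2
    have hget : PySem.List.pyGetD messages ((j : Int)) ([] : List (String × String)) = messages[j]?.getD [] := by
      simp [PySem.List.pyGetD_natCast, List.getD]
    have hslice : PySem.List.slice messages (some ((j : Int) + 1)) none = messages.drop (j+1) := by
      have h : ((j : Int) + 1) = ((j + 1 : Nat) : Int) := by push_cast; ring
      rw [h, PySem.List.slice_from_natCast]
    have hne : ((j : Int) == (-1 : Int)) = false := by
      rw [beq_eq_false_iff_ne]; omega
    rw [h1, h2]
    simp only [hne, Bool.false_eq_true, if_false, hget, hslice]
    simp
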